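-- pv_equiv track=rewrite | github.com/Nador02/aoc | 2023/day_12/problem1.py | _map_possibility_to_springs
-- ===== SOURCE A (Python) =====
-- from enum import StrEnum
-- from typing import List, NamedTuple
--
-- class Spring(StrEnum):
--     DAMAGED = "#"
--     OPERATIONAL = "."
--     UNKNOWN = "?"
--
-- def _map_possibility_to_springs(possibility: List, springs: str):
--     unknown_indices =  [i for i, ltr in enumerate(springs) if ltr == Spring.UNKNOWN]
--     possible_springs = []
--     idx = 0
--     for i in range(len(springs)):
--         if i not in unknown_indices:
--             possible_springs.append(springs[i])
--             continue
--         possible_springs.append(possibility[idx])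
--         idx += 1
--     return "".join(possible_springs)
-- ===== SOURCE B (Python) =====
-- from typing import List
--
--
-- def _map_possibility_to_springs(possibility: List, springs: str):
--     parts = springs.split("?")
--     pieces = [parts[0]]
--     for i in range(len(parts) - 1):
--         pieces.append(possibility[i])
--         pieces.append(parts[i + 1])
--     return "".join(pieces)
-- ===== Notes on version B (the rewrite author's own statement) =====
-- stated objective: faster
-- what changed: B splits the string on '?' once and interleaves the fixed segments with the possibility values, instead of A's per-character loop that tests each index for membership in a list of '?' positions and maintains a separate counter.
import Mathlib
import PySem

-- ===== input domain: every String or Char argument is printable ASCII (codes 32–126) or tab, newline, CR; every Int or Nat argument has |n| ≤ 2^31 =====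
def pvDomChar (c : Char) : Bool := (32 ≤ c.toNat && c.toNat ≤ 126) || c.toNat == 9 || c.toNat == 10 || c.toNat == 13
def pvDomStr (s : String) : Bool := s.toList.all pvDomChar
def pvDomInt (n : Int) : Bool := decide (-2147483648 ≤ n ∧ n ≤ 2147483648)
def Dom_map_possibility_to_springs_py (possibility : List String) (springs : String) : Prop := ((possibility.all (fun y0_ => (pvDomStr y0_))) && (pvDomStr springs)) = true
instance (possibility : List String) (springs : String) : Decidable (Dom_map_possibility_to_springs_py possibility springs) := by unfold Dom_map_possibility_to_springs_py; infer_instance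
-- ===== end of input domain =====

-- B replaces A's per-character scan (membership test in an index list plus an index counter)
-- by splitting on '?' and interleaving the fixed segments with the possibility values.

-- ===== PORT A =====
def map_possibility_to_springs_py (possibility : List String) (springs : String) : String :=
  let cs := springs.toList
  -- unknown_indices = [i for i, ltr in enumerate(springs) if ltr == Spring.UNKNOWN]
  let unknown_indices : List Int :=
    ((PySem.List.enumerate cs 0).filter (fun p => p.2 == '?')).map (·.1)
  -- for i in range(len(springs)): … (state = (idx, possible_springs))
  let st := (PySem.List.pyRange 0 (cs.length : Int) 1).foldl
    (fun (st : Int × List String) i =>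
      if ¬ (i ∈ unknown_indices) then
        (st.1, st.2 ++ [String.ofList [PySem.List.pyGetD cs i ' ']])   -- springs[i] (i always in range)
      else
        (st.1 + 1, st.2 ++ [PySem.List.pyGetD possibility st.1 ""]))  -- possibility[idx]; IndexError excluded by Pre_
    (0, [])
  PySem.Str.join "" st.2

-- ===== PORT B =====
def map_possibility_to_springs_py_alt (possibility : List String) (springs : String) : String :=
  -- parts = springs.split("?")
  let parts : List String := (PySem.Chars.splitOn springs.toList ['?']).map String.ofList
  -- pieces = [parts[0]]; for i in range(len(parts) - 1): pieces += [possibility[i], parts[i + 1]]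
  let pieces := (PySem.List.pyRange 0 ((parts.length : Int) - 1) 1).foldl
    (fun acc i =>
      acc ++ [PySem.List.pyGetD possibility i ""] ++ [PySem.List.pyGetD parts (i + 1) ""])
    [PySem.List.pyGetD parts 0 ""]
  PySem.Str.join "" pieces

-- ===== PRECONDITION & SPEC =====
-- Python A raises IndexError when possibility has fewer entries than '?' occurrences in springs; Pre_ excludes exactly that.
def Pre_map_possibility_to_springs_py (possibility : List String) (springs : String) : Prop :=
  springs.toList.count '?' ≤ possibility.length
instance (possibility : List String) (springs : String) : Decidable (Pre_map_possibility_to_springs_py possibility springs) := by unfold Pre_map_possibility_to_springs_py; infer_instance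

def pvWitness_map_possibility_to_springs_py : List String × String := (["#", "."], "?#.?")

def Spec_map_possibility_to_springs_py (possibility : List String) (springs : String) (out : String) : Prop := out = map_possibility_to_springs_py_alt possibility springs
instance (possibility : List String) (springs : String) (out : String) : Decidable (Spec_map_possibility_to_springs_py possibility springs out) := by unfold Spec_map_possibility_to_springs_py; infer_instance

-- ===== CLAIM (what is proved, stated in full; the proofs are below) =====
def Claim_equal_map_possibility_to_springs_py : Prop := ∀ (possibility : List String) (springs : String), Dom_map_possibility_to_springs_py possibility springs → Pre_map_possibility_to_springs_py possibility springs → Spec_map_possibility_to_springs_py possibility springs (map_possibility_to_springs_py possibility springs)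

-- ===== LEMMAS AND PROOFS =====

-- A's output as a structural recursion over the characters:
def pvRep (ps : List String) : List Char → Nat → List String
  | [], _ => []
  | c :: t, i =>
    if c = '?' then PySem.List.pyGetD ps (i : Int) "" :: pvRep ps t (i + 1)
    else String.ofList [c] :: pvRep ps t i

-- the result of splitting on '?', structurally:
def pvSplitQ : List Char → List (List Char)
  | [] => [[]]
  | c :: t =>
    if c = '?' then [] :: pvSplitQ t
    else match pvSplitQ t with
      | [] => [[c]]
      | q :: qs => (c :: q) :: qs

def pvPrependFirst (p : List Char) : List (List Char) → List (List Char)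
  | [] => [p]
  | q :: qs => (p ++ q) :: qs

theorem pvSplitQ_ne_nil (cs : List Char) : pvSplitQ cs ≠ [] := by
  cases cs with
  | nil => simp [pvSplitQ]
  | cons c t =>
    simp only [pvSplitQ]
    split
    · simp
    · split <;> simp_all

theorem pvGo_eq :
    ∀ (fuel : Nat) (l cur : List Char) (acc : List (List Char)), l.length ≤ fuel →
    PySem.Chars.splitOn.go ['?'] fuel l cur acc
      = acc.reverse ++ pvPrependFirst cur.reverse (pvSplitQ l) := by
  intro fuel
  induction fuel with
  | zero =>
    intro l cur acc h
    have hl : l = [] := List.eq_nil_of_length_eq_zero (Nat.le_zero.mp h)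
    subst hl
    simp [PySem.Chars.splitOn.go, pvSplitQ, pvPrependFirst]
  | succ n ih =>
    intro l cur acc h
    cases l with
    | nil => simp [PySem.Chars.splitOn.go, pvSplitQ, pvPrependFirst]
    | cons c rest =>
      by_cases hc : c = '?'
      · have hp : List.isPrefixOf ['?'] (c :: rest) = true := by simp [hc, List.isPrefixOf]
        rw [PySem.Chars.splitOn.go, if_pos hp]
        rw [ih _ _ _ (by simpa using Nat.le_of_succ_le_succ h)]
        cases hq : pvSplitQ rest with
        | nil => exact absurd hq (pvSplitQ_ne_nil rest)
        | cons q qs => simp [pvSplitQ, hc, hq, pvPrependFirst]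
      · have hp : List.isPrefixOf ['?'] (c :: rest) = false := by
          simp [List.isPrefixOf]
          exact fun h' => hc h'.symm
        rw [PySem.Chars.splitOn.go, if_neg (by simp [hp])]
        rw [ih _ _ _ (by simpa using Nat.le_of_succ_le_succ h)]
        cases hq : pvSplitQ rest with
        | nil => exact absurd hq (pvSplitQ_ne_nil rest)
        | cons q qs => simp [pvSplitQ, hc, hq, pvPrependFirst]

theorem pvSplitOn_eq (cs : List Char) : PySem.Chars.splitOn cs ['?'] = pvSplitQ cs := by
  rw [PySem.Chars.splitOn, pvGo_eq (cs.length + 1) cs [] [] (Nat.le_succ _)]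
  cases hq : pvSplitQ cs with
  | nil => exact absurd hq (pvSplitQ_ne_nil cs)
  | cons q qs => simp [pvPrependFirst]

-- membership in A's unknown_indices list
theorem pvMem_unknown (cs : List Char) :
    ∀ (s j : Int), j ∈ (((PySem.List.enumerate cs s).filter (fun p => p.2 == '?')).map (·.1))
      ↔ ∃ k : Nat, ∃ _ : k < cs.length, j = s + k ∧ cs[k] = '?' := by
  induction cs with
  | nil => intro s j; simp [PySem.List.enumerate_nil]
  | cons c t ih =>
    intro s j
    rw [PySem.List.enumerate_cons]
    rw [List.filter_cons]
    by_cases hc : c = '?'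
    · rw [if_pos (by simpa using hc)]
      rw [List.map_cons, List.mem_cons, ih (s+1) j]
      constructor
      · rintro (h0 | ⟨k, hk, hjk, hck⟩)
        · exact ⟨0, by simp, by simpa using h0, by simpa using hc⟩
        · exact ⟨k+1, by simp only [List.length_cons]; omega, by push_cast at hjk ⊢; omega, by simpa using hck⟩
      · rintro ⟨k, hk, hjk, hck⟩
        cases k with
        | zero => exact Or.inl (by simpa using hjk)
        | succ m =>
          have hm : m < t.length := by simp only [List.length_cons] at hk; omega
          exact Or.inr ⟨m, hm, by push_cast at hjk ⊢; omega, by simpa using hck⟩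
    · rw [if_neg (by simpa using hc)]
      rw [ih (s+1) j]
      constructor
      · rintro ⟨k, hk, hjk, hck⟩
        exact ⟨k+1, by simp only [List.length_cons]; omega, by push_cast at hjk ⊢; omega, by simpa using hck⟩
      · rintro ⟨k, hk, hjk, hck⟩
        cases k with
        | zero => exact absurd (by simpa using hck) hc
        | succ m =>
          have hm : m < t.length := by simp only [List.length_cons] at hk; omega
          exact ⟨m, hm, by push_cast at hjk ⊢; omega, by simpa using hck⟩

-- A's loop computes pvRep
theorem pvLoopA (possibility : List String) (cs : List Char) :
    ∀ (k idx : Nat) (acc : List String), k ≤ cs.length →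
    ((PySem.List.pyRange (k : Int) (cs.length : Int) 1).foldl
      (fun (st : Int × List String) i =>
        if ¬ (i ∈ (((PySem.List.enumerate cs 0).filter (fun p => p.2 == '?')).map (·.1))) then
          (st.1, st.2 ++ [String.ofList [PySem.List.pyGetD cs i ' ']])
        else
          (st.1 + 1, st.2 ++ [PySem.List.pyGetD possibility st.1 ""]))
      ((idx : Int), acc)).2 = acc ++ pvRep possibility (cs.drop k) idx := by
  intro k
  induction hn : cs.length - k generalizing k with
  | zero =>
    intro idx acc hk
    have hk' : k = cs.length := by omega
    subst hk'
    rw [PySem.List.pyRange_one_eq_nil (by omega)]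
    simp [pvRep]
  | succ n ih =>
    intro idx acc hk
    have hklt : k < cs.length := by omega
    rw [PySem.List.pyRange_one_cons (by exact_mod_cast hklt)]
    rw [List.foldl_cons]
    have hdrop : cs.drop k = cs[k] :: cs.drop (k+1) := List.drop_eq_getElem_cons hklt
    have hmem : ((k : Int) ∈ (((PySem.List.enumerate cs 0).filter (fun p => p.2 == '?')).map (·.1))) ↔ cs[k] = '?' := by
      rw [pvMem_unknown]
      constructor
      · rintro ⟨m, hm, hjm, hcm⟩
        have hmk : m = k := by omega
        subst hmk; exact hcm
      · intro h; exact ⟨k, hklt, by omega, h⟩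
    have hcast : ((k : Int) + 1) = ((k + 1 : Nat) : Int) := by push_cast; ring
    by_cases hq : cs[k] = '?'
    · rw [if_neg (by simp [hmem, hq])]
      have hcast2 : ((idx : Int) + 1) = ((idx + 1 : Nat) : Int) := by push_cast; ring
      simp only [hcast, hcast2]
      rw [ih (k+1) (by omega) (idx+1) _ (by omega)]
      rw [hdrop]
      simp [pvRep, hq]
    · rw [if_pos (by simp [hmem, hq])]
      simp only [hcast]
      rw [ih (k+1) (by omega) idx _ (by omega)]
      rw [hdrop]
      simp only [pvRep, if_neg hq, List.append_assoc]
      congr 2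
      rw [PySem.List.pyGetD_natCast]
      simp [List.getD, hklt]

-- joined characters of pvRep equal the glued split segments
def pvGlue (ps : List String) : List (List Char) → Nat → List Char
  | [], _ => []
  | [q], _ => q
  | q :: r :: qs, i => q ++ (PySem.List.pyGetD ps (i : Int) "").toList ++ pvGlue ps (r :: qs) (i + 1)

theorem pvGlue_cons_char (ps : List String) (c : Char) (q : List Char) (qs : List (List Char)) (i : Nat) :
    pvGlue ps ((c :: q) :: qs) i = c :: pvGlue ps (q :: qs) i := by
  cases qs <;> simp [pvGlue]

theorem pvRep_glue (ps : List String) :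
    ∀ (cs : List Char) (i : Nat),
      ((pvRep ps cs i).map String.toList).flatten = pvGlue ps (pvSplitQ cs) i := by
  intro cs
  induction cs with
  | nil => intro i; simp [pvRep, pvSplitQ, pvGlue]
  | cons c t ih =>
    intro i
    by_cases hc : c = '?'
    · simp only [pvRep, pvSplitQ, if_pos hc]
      cases hq : pvSplitQ t with
      | nil => exact absurd hq (pvSplitQ_ne_nil t)
      | cons q qs =>
        rw [List.map_cons, List.flatten_cons, ih (i+1), hq]
        simp [pvGlue]
    · simp only [pvRep, pvSplitQ, if_neg hc]
      cases hq : pvSplitQ t with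
      | nil => exact absurd hq (pvSplitQ_ne_nil t)
      | cons q qs =>
        rw [pvGlue_cons_char, List.map_cons, List.flatten_cons, ← hq, ← ih i]
        simp

-- B's interleaving, structurally
def pvInter (ps : List String) : List String → Nat → List String
  | [], _ => []
  | q :: qs, i => PySem.List.pyGetD ps (i : Int) "" :: q :: pvInter ps qs (i + 1)

theorem pvLoopB (possibility : List String) (p0 : String) (tail : List String) :
    ∀ (k : Nat) (acc : List String), k ≤ tail.length →
    (PySem.List.pyRange (k : Int) (tail.length : Int) 1).foldl
      (fun acc i =>
        acc ++ [PySem.List.pyGetD possibility i ""] ++ [PySem.List.pyGetD (p0 :: tail) (i + 1) ""])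
      acc = acc ++ pvInter possibility (tail.drop k) k := by
  intro k
  induction hn : tail.length - k generalizing k with
  | zero =>
    intro acc hk
    have hk' : k = tail.length := by omega
    subst hk'
    rw [PySem.List.pyRange_one_eq_nil (by omega)]
    simp [pvInter]
  | succ n ih =>
    intro acc hk
    have hklt : k < tail.length := by omega
    rw [PySem.List.pyRange_one_cons (by exact_mod_cast hklt)]
    rw [List.foldl_cons]
    have hcast : ((k : Int) + 1) = ((k + 1 : Nat) : Int) := by push_cast; ring
    rw [hcast, ih (k+1) (by omega) _ (by omega)]
    rw [List.drop_eq_getElem_cons hklt]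
    have hget : PySem.List.pyGetD (p0 :: tail) (((k + 1 : Nat) : Int)) "" = tail[k] := by
      rw [PySem.List.pyGetD_natCast]
      simp [List.getD_eq_getElem?_getD, List.getElem?_cons_succ, List.getElem?_eq_getElem hklt]
    simp [pvInter]
    rw [hcast]
    exact hget

-- glue = flattened interleaving of B's pieces
theorem pvGlue_inter (ps : List String) :
    ∀ (qs : List (List Char)) (q0 : List Char) (i : Nat),
      pvGlue ps (q0 :: qs) i
        = q0 ++ ((pvInter ps (qs.map String.ofList) i).map String.toList).flatten := by
  intro qs
  induction qs with
  | nil => intro q0 i; simp [pvGlue, pvInter]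
  | cons r rs ih =>
    intro q0 i
    simp only [pvGlue, List.map_cons, pvInter, List.flatten_cons, List.map_cons]
    rw [ih r (i+1)]
    simp

-- "".join = flatten of the character lists
theorem pvJoin_empty (parts : List String) :
    PySem.Str.join "" parts = String.ofList ((parts.map String.toList).flatten) := by
  show String.ofList (PySem.Chars.join ("" : String).toList (parts.map String.toList)) = _
  have hnil : ("" : String).toList = [] := rfl
  rw [hnil]
  congr 1
  induction parts with
  | nil => simp [PySem.Chars.join_nil]
  | cons q qs ih =>
    cases qs with
    | nil => simp [PySem.Chars.join_singleton]
    | cons r rs =>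
      simp only [List.map_cons] at *
      rw [PySem.Chars.join_cons_cons]
      simp_all

-- ===== VERDICT (by name: the statement is the Claim_ definition above) =====
theorem map_possibility_to_springs_py_spec : Claim_equal_map_possibility_to_springs_py := by
  intro possibility springs _ _
  unfold Spec_map_possibility_to_springs_py
  unfold map_possibility_to_springs_py map_possibility_to_springs_py_alt
  simp only []
  set cs := springs.toList with hcs
  -- A's side
  have hA := pvLoopA possibility cs 0 0 [] (Nat.zero_le _)
  simp only [Nat.cast_zero, List.drop_zero, List.nil_append] at hA
  rw [hA, pvJoin_empty, pvRep_glue]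
  -- B's side
  rw [pvSplitOn_eq]
  cases hq : pvSplitQ cs with
  | nil => exact absurd hq (pvSplitQ_ne_nil cs)
  | cons q0 qs =>
    rw [List.map_cons]
    have hlen : (((String.ofList q0 :: qs.map String.ofList).length : Nat) : Int) - 1 = (((qs.map String.ofList).length : Nat) : Int) := by
      simp only [List.length_cons, List.length_map]
      push_cast; ring
    rw [hlen]
    have hB := pvLoopB possibility (String.ofList q0) (qs.map String.ofList) 0
      [PySem.List.pyGetD (String.ofList q0 :: qs.map String.ofList) 0 ""] (Nat.zero_le _)
    simp only [Nat.cast_zero, List.drop_zero] at hB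
    rw [hB, pvJoin_empty]
    rw [PySem.List.pyGetD_zero_cons]
    rw [pvGlue_inter]
    simp
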